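-- pv_equiv track=rewrite | github.com/vv137/NextFold | src/nextfold/data/parsers.py | parse_stockholm
-- ===== SOURCE A (Python) =====
-- import collections
-- from typing import Iterable, Sequence
--
-- DeletionMatrix = Sequence[Sequence[int]]
--
-- def parse_stockholm(
--     stockholm_string: str,
-- ) -> tuple[Sequence[str], DeletionMatrix, Sequence[str]]:
--     """Parses sequences and deletion matrix from stockholm format alignment.
--
--     Args:
--         stockholm_string (str):
--             The string contents of a stockholm file.
--             The first sequence in the file should be the query sequence.
--
--
--     Returns:
--         tuple[Sequence[str], DeletionMatrix, Sequence[str]]: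
--         A tuple of:
--             - A list of sequences that have been aligned to the query.
--                 These might contain duplicates.
--             - The deletion matrix for the alignment as a list of lists.
--                 The element at `deletion_matrix[i][j]` is the number of
--                 residues deleted from the aligned sequence `i` at residue
--                 position `j`.
--             - The names of the targets matched, including the jackhmmer
--                 subsequence suffix.
--
--     """
--     name_to_sequence = collections.OrderedDict()
--     for line in stockholm_string.splitlines():
--         line = line.strip()
--         if not line or line.startswith(("#", "//")):
--             continue
--         name, sequence = line.split()
--         if name not in name_to_sequence:
--             name_to_sequence[name] = ""
--         name_to_sequence[name] += sequence
--
--     msa = []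
--     deletion_matrix = []
--
--     query = ""
--     keep_columns = []
--     for seq_index, sequence in enumerate(name_to_sequence.values()):
--         if seq_index == 0:
--             # Gather the columns with gaps from the query
--             query = sequence
--             keep_columns = [i for i, res in enumerate(query) if res != "-"]
--
--         # Remove the columns with gaps in the query from all sequences.
--         aligned_sequence = "".join([sequence[c] for c in keep_columns])
--
--         msa.append(aligned_sequence)
--
--         # Count the number of deletions w.r.t. query.
--         deletion_vec = []
--         deletion_count = 0
--         for seq_res, query_res in zip(sequence, query):
--             if seq_res != "-" or query_res != "-":
--                 if query_res == "-":
--                     deletion_count += 1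
--                 else:
--                     deletion_vec.append(deletion_count)
--                     deletion_count = 0
--         deletion_matrix.append(deletion_vec)
--
--     return msa, deletion_matrix, list(name_to_sequence.keys())
-- ===== SOURCE B (Python) =====
-- import collections
--
--
-- def parse_stockholm(stockholm_string):
--     name_to_sequence = collections.OrderedDict()
--     for line in stockholm_string.splitlines():
--         line = line.strip()
--         if not line or line.startswith(("#", "//")):
--             continue
--         name, sequence = line.split()
--         if name not in name_to_sequence:
--             name_to_sequence[name] = ""
--         name_to_sequence[name] += sequence
--
--     sequences = list(name_to_sequence.values())
--     if not sequences:
--         return [], [], []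
--     query = sequences[0]
--     keep_columns = [i for i, res in enumerate(query) if res != "-"]
--
--     # segments[j] = the query-gap columns lying just before keep_columns[j]
--     segments = []
--     prev = -1
--     for c in keep_columns:
--         segments.append(range(prev + 1, c))
--         prev = c
--
--     msa = [
--         "".join([sequence[c] for c in keep_columns]) for sequence in sequences
--     ]
--     deletion_matrix = [
--         [sum(1 for c in seg if sequence[c] != "-") for seg in segments]
--         for sequence in sequences
--     ]
--     return msa, deletion_matrix, list(name_to_sequence.keys())
-- ===== Notes on version B (the rewrite author's own statement) =====
-- stated objective: alternative
-- what changed: The per-sequence running-counter scan over zip(sequence, query) is replaced by a segments table precomputed once from the query (for each keep column, the range of query-gap columns just before it); each deletion entry is then a direct count of non-gap residues in its segment, and msa/deletion_matrix are built by comprehensions over the sequences.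
import Mathlib
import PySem

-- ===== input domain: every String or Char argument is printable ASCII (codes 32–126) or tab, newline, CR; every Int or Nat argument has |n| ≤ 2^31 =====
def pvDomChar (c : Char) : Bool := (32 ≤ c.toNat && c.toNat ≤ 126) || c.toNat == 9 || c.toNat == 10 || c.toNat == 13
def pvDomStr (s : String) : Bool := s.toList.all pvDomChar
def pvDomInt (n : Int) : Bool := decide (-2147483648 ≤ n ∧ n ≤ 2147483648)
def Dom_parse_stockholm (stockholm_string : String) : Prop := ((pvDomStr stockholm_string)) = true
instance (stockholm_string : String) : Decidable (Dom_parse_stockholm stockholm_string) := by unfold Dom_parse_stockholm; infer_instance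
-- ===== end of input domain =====

-- B replaces A's per-sequence running-counter scan by a segments table precomputed
-- once from the query; equal cost, different decomposition (objective: alternative).
-- The line-accumulation phase is identical in both (hinted "keep as-is"): it is the
-- shared helper pvAccum; pvKeepCols is the shared keep-column comprehension.

-- ===== PORT A =====
-- name_to_sequence accumulation loop (identical in Source A and Source B).
-- The '| _ => d' arm is Python's ValueError on 'name, sequence = line.split()';
-- Pre_parse_stockholm excludes such inputs.
def pvAccum (stockholm_string : String) : PySem.Dict (List Char) (List Char) :=
  (PySem.Chars.splitlines stockholm_string.toList).foldl
    (fun d line0 =>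
      let line := PySem.Chars.strip line0
      if line.isEmpty || PySem.Chars.startswith line ['#'] ||
          PySem.Chars.startswith line ['/', '/'] then d
      else
        match PySem.Chars.split₀ line with
        | [name, sequence] =>
          let d1 := if d.contains name then d else d.insert name []
          d1.insert name (d1.getD name [] ++ sequence)
        | _ => d)
    PySem.Dict.empty

-- [i for i, res in enumerate(query) if res != "-"]  (identical in Source A and Source B)
def pvKeepCols (query : List Char) : List Int :=
  ((PySem.List.enumerate query 0).filter (fun e => e.2 ≠ '-')).map (·.1)

def parse_stockholm (stockholm_string : String) : List String × List (List Int) × List String :=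
  let nts := pvAccum stockholm_string
  let fin := (PySem.List.enumerate nts.values 0).foldl
    (fun (st : List String × List (List Int) × List Char × List Int) p =>
      let qk := if p.1 = 0 then (p.2, pvKeepCols p.2) else (st.2.2.1, st.2.2.2)
      let aligned := String.ofList (qk.2.map (fun c => PySem.List.pyGetD p.2 c ' '))
      let dv := ((p.2.zip qk.1).foldl
        (fun (vc : List Int × Int) pr =>
          if pr.1 ≠ '-' ∨ pr.2 ≠ '-' then
            (if pr.2 = '-' then (vc.1, vc.2 + 1) else (vc.1 ++ [vc.2], 0))
          else vc) ([], 0)).1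
      (st.1 ++ [aligned], st.2.1 ++ [dv], qk.1, qk.2))
    ([], [], [], [])
  (fin.1, fin.2.1, nts.keys.map String.ofList)

-- ===== PORT B =====
def parse_stockholm_alt (stockholm_string : String) : List String × List (List Int) × List String :=
  let nts := pvAccum stockholm_string
  match nts.values with
  | [] => ([], [], [])
  | query :: _ =>
    let keep_columns := pvKeepCols query
    let segments := (keep_columns.foldl
      (fun (ap : List (List Int) × Int) c =>
        (ap.1 ++ [PySem.List.pyRange (ap.2 + 1) c 1], c)) ([], -1)).1
    let msa := nts.values.map
      (fun sequence => String.ofList (keep_columns.map (fun c => PySem.List.pyGetD sequence c ' ')))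
    let deletion_matrix := nts.values.map
      (fun sequence => segments.map
        (fun seg => ((seg.filter (fun c => PySem.List.pyGetD sequence c ' ' ≠ '-')).length : Int)))
    (msa, deletion_matrix, nts.keys.map String.ofList)

-- ===== PRECONDITION & SPEC =====
-- helpers for Pre_ (independent of the ports): the parsed (name, sequence) pairs
-- of the relevant lines, grouped by first occurrence of the name
def pvParseLine? (line0 : List Char) : Option (List Char × List Char) :=
  let line := PySem.Chars.strip line0
  if line.isEmpty || PySem.Chars.startswith line ['#'] ||
      PySem.Chars.startswith line ['/', '/'] then none
  else
    match PySem.Chars.split₀ line with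
    | [name, sequence] => some (name, sequence)
    | _ => none

def pvPairs (stockholm_string : String) : List (List Char × List Char) :=
  (PySem.Chars.splitlines stockholm_string.toList).filterMap pvParseLine?

def pvNames (stockholm_string : String) : List (List Char) :=
  PySem.Set.ofList ((pvPairs stockholm_string).map (·.1))

def pvSeqFor (stockholm_string : String) (n : List Char) : List Char :=
  (((pvPairs stockholm_string).filter (fun p => p.1 == n)).map (·.2)).flatten

def pvSeqList (stockholm_string : String) : List (List Char) :=
  (pvNames stockholm_string).map (pvSeqFor stockholm_string)

def pvQuery (stockholm_string : String) : List Char :=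
  (pvSeqList stockholm_string).headD []

-- Pre_ = exactly the inputs where Python A returns normally: every relevant
-- (non-empty, non-comment) line splits into exactly two tokens (else ValueError),
-- and every keep column of the query indexes into every accumulated sequence
-- (else IndexError in the aligned-sequence join).
def Pre_parse_stockholm (stockholm_string : String) : Prop :=
  (∀ l ∈ (PySem.Chars.splitlines stockholm_string.toList).map PySem.Chars.strip,
     (l.isEmpty || PySem.Chars.startswith l ['#'] ||
       PySem.Chars.startswith l ['/', '/']) = false →
     (PySem.Chars.split₀ l).length = 2) ∧
  (∀ t ∈ pvSeqList stockholm_string,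
     ∀ i ∈ pvKeepCols (pvQuery stockholm_string), i < (t.length : Int))

instance (stockholm_string : String) : Decidable (Pre_parse_stockholm stockholm_string) := by
  unfold Pre_parse_stockholm; infer_instance

def pvWitness_parse_stockholm : String := "q AB-C\ns AGGC\n#=GC RF xxxx\n//"

def Spec_parse_stockholm (stockholm_string : String) (out : List String × List (List Int) × List String) : Prop := out = parse_stockholm_alt stockholm_string
instance (stockholm_string : String) (out : List String × List (List Int) × List String) : Decidable (Spec_parse_stockholm stockholm_string out) := by unfold Spec_parse_stockholm; infer_instance

-- ===== CLAIM (what is proved, stated in full; the proofs are below) =====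
def Claim_equal_parse_stockholm : Prop := ∀ (stockholm_string : String), Dom_parse_stockholm stockholm_string → Pre_parse_stockholm stockholm_string → Spec_parse_stockholm stockholm_string (parse_stockholm stockholm_string)

-- ===== LEMMAS AND PROOFS =====

-- A's deletion scan as a structural recursion over zip(sequence, query)
def pvDA : List (Char × Char) → Int → List Int
  | [], _ => []
  | pr :: zs, c =>
    if pr.2 = '-' then pvDA zs (c + if pr.1 ≠ '-' then 1 else 0) else c :: pvDA zs 0

-- keep columns, structurally
def pvKF : List Char → List Int
  | [] => []
  | ch :: q => if ch = '-' then (pvKF q).map (· + 1) else 0 :: (pvKF q).map (· + 1)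

-- B's segments table, structurally
def pvSegs : List Int → Int → List (List Int)
  | [], _ => []
  | k :: ks, prev => PySem.List.pyRange (prev + 1) k 1 :: pvSegs ks k

def pvCount (s : List Char) (seg : List Int) : Int :=
  ((seg.filter (fun c => PySem.List.pyGetD s c ' ' ≠ '-')).length : Int)

def pvAddFirst (c : Int) : List Int → List Int
  | [] => []
  | x :: xs => (c + x) :: xs

theorem pvAddFirst_zero (l : List Int) : pvAddFirst 0 l = l := by
  cases l <;> simp [pvAddFirst]

theorem pvEnumShift {α : Type} (xs : List α) (s : Int) :
    PySem.List.enumerate xs s = (PySem.List.enumerate xs 0).map (fun p => (p.1 + s, p.2)) := by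
  induction xs generalizing s with
  | nil => simp [PySem.List.enumerate_nil]
  | cons x xs ih =>
    rw [PySem.List.enumerate_cons, PySem.List.enumerate_cons, ih (s + 1), ih (0 + 1)]
    simp only [List.map_cons, List.map_map]
    congr 1
    · simp
    · apply List.map_congr_left
      intro p _
      simp only [Function.comp_def, Prod.mk.injEq, and_true]
      ring

theorem pvKeep_eq (q : List Char) : pvKeepCols q = pvKF q := by
  induction q with
  | nil => simp [pvKeepCols, pvKF, PySem.List.enumerate_nil]
  | cons ch q ih =>
    rw [pvKeepCols, PySem.List.enumerate_cons, pvEnumShift q (0 + 1)]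
    rw [List.filter_cons, List.filter_map]
    by_cases h : ch = '-' <;>
      simp [pvKF, h, ← ih, pvKeepCols, List.map_map, Function.comp_def]

theorem pvDA_foldl (zs : List (Char × Char)) : ∀ (vec : List Int) (c : Int),
    ((zs.foldl (fun (vc : List Int × Int) pr =>
        if pr.1 ≠ '-' ∨ pr.2 ≠ '-' then
          (if pr.2 = '-' then (vc.1, vc.2 + 1) else (vc.1 ++ [vc.2], 0))
        else vc) (vec, c)).1) = vec ++ pvDA zs c := by
  induction zs with
  | nil => intro vec c; simp [pvDA]
  | cons pr zs ih =>
    intro vec c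
    by_cases h2 : pr.2 = '-'
    · by_cases h1 : pr.1 = '-'
      · simp [pvDA, h1, h2, ih]
      · simp [pvDA, h1, h2, ih]
    · simp [pvDA, h2, ih]

theorem pvSegs_foldl (ks : List Int) : ∀ (acc : List (List Int)) (prev : Int),
    (ks.foldl (fun (ap : List (List Int) × Int) c =>
        (ap.1 ++ [PySem.List.pyRange (ap.2 + 1) c 1], c)) (acc, prev)).1
      = acc ++ pvSegs ks prev := by
  induction ks with
  | nil => intro acc prev; simp [pvSegs]
  | cons k ks ih => intro acc prev; simp [pvSegs, ih]

theorem pvRange_shift (a b : Int) :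
    PySem.List.pyRange (a + 1) (b + 1) 1 = (PySem.List.pyRange a b 1).map (· + 1) := by
  rw [PySem.List.pyRange_one, PySem.List.pyRange_one]
  have : b + 1 - (a + 1) = b - a := by ring
  rw [this, List.map_map]
  apply List.map_congr_left
  intro x _
  simp [Function.comp]; ring

theorem pvSegs_shift (ks : List Int) : ∀ (prev : Int),
    pvSegs (ks.map (· + 1)) (prev + 1) = (pvSegs ks prev).map (List.map (· + 1)) := by
  induction ks with
  | nil => intro prev; simp [pvSegs]
  | cons k ks ih =>
    intro prev
    simp only [List.map_cons, pvSegs, List.map]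
    rw [ih k, ← pvRange_shift]

theorem pvGetD_cons (x : Char) (s : List Char) (i : Int) (d : Char) (h : 0 ≤ i) :
    PySem.List.pyGetD (x :: s) (i + 1) d = PySem.List.pyGetD s i d := by
  obtain ⟨n, rfl⟩ : ∃ n : Nat, i = (n : Int) := ⟨i.toNat, (Int.toNat_of_nonneg h).symm⟩
  have : (n : Int) + 1 = ((n + 1 : Nat) : Int) := by push_cast; ring
  rw [this, PySem.List.pyGetD_natCast, PySem.List.pyGetD_natCast, List.getD_cons_succ]

theorem pvCount_shift (x : Char) (s : List Char) (seg : List Int)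
    (h : ∀ i ∈ seg, 0 ≤ i) :
    pvCount (x :: s) (seg.map (· + 1)) = pvCount s seg := by
  unfold pvCount
  rw [List.filter_map]
  have heq : seg.filter (fun i => decide (PySem.List.pyGetD (x :: s) (i + 1) ' ' ≠ '-'))
      = seg.filter (fun i => decide (PySem.List.pyGetD s i ' ' ≠ '-')) := by
    apply List.filter_congr
    intro i hi
    rw [pvGetD_cons x s i ' ' (h i hi)]
  rw [show (fun c => decide (PySem.List.pyGetD (x :: s) c ' ' ≠ '-')) ∘ (· + 1)
      = fun i => decide (PySem.List.pyGetD (x :: s) (i + 1) ' ' ≠ '-') from rfl]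
  rw [heq, List.length_map]

theorem pvCount_cons (s : List Char) (a : Int) (seg : List Int) :
    pvCount s (a :: seg)
      = (if PySem.List.pyGetD s a ' ' = '-' then 0 else 1) + pvCount s seg := by
  unfold pvCount
  rw [List.filter_cons]
  by_cases h : PySem.List.pyGetD s a ' ' = '-'
  · simp [h]
  · simp [h]
    ring

theorem pvKF_nonneg (q : List Char) : ∀ i ∈ pvKF q, 0 ≤ i := by
  induction q with
  | nil => simp [pvKF]
  | cons ch q ih =>
    intro i hi
    unfold pvKF at hi
    by_cases h : ch = '-' <;> simp [h] at hi
    · obtain ⟨j, hj, rfl⟩ := hi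
      have := ih j hj; omega
    · rcases hi with rfl | ⟨j, hj, rfl⟩
      · omega
      · have := ih j hj; omega

theorem pvSegs_nonneg (ks : List Int) : ∀ (prev : Int), -1 ≤ prev →
    (∀ k ∈ ks, 0 ≤ k) → ∀ seg ∈ pvSegs ks prev, ∀ i ∈ seg, 0 ≤ i := by
  induction ks with
  | nil => simp [pvSegs]
  | cons k ks ih =>
    intro prev hp hk seg hseg i hi
    simp only [pvSegs, List.mem_cons] at hseg
    rcases hseg with rfl | hseg
    · rw [PySem.List.mem_pyRange_one] at hi; omega
    · exact ih k (by have := hk k (by simp); omega)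
        (fun j hj => hk j (by simp [hj])) seg hseg i hi

theorem pvMain (q : List Char) : ∀ (s : List Char) (c : Int),
    (∀ i ∈ pvKF q, i < (s.length : Int)) →
    pvDA (s.zip q) c = pvAddFirst c ((pvSegs (pvKF q) (-1)).map (pvCount s)) := by
  induction q with
  | nil =>
    intro s c _
    simp [pvKF, pvSegs, pvDA, pvAddFirst]
  | cons ch q ih =>
    intro s c hb
    cases s with
    | nil =>
      have hK : pvKF (ch :: q) = [] := by
        cases hK : pvKF (ch :: q) with
        | nil => rfl
        | cons k ks =>
          exfalso
          have h0 : (0 : Int) ≤ k := pvKF_nonneg (ch :: q) k (by rw [hK]; simp)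
          have h1 := hb k (by rw [hK]; simp)
          simp at h1
          omega
      rw [hK]
      simp [pvSegs, pvDA, pvAddFirst]
    | cons x s =>
      by_cases h : ch = '-'
      · -- gap column in the query
        subst h
        have hKq : pvKF ('-' :: q) = (pvKF q).map (· + 1) := by simp [pvKF]
        have hb' : ∀ i ∈ pvKF q, i < (s.length : Int) := by
          intro i hi
          have := hb (i + 1) (by rw [hKq]; exact List.mem_map_of_mem hi)
          simp at this ⊢
          omega
        have hda : pvDA ((x :: s).zip ('-' :: q)) c
            = pvDA (s.zip q) (c + if x ≠ '-' then 1 else 0) := by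
          simp [List.zip_cons_cons, pvDA]
        rw [hda, ih s _ hb', hKq]
        cases hK : pvKF q with
        | nil => simp [pvSegs, pvAddFirst]
        | cons k ks =>
          have hk0 : (0 : Int) ≤ k := pvKF_nonneg q k (by rw [hK]; simp)
          have hks : ∀ j ∈ ks, 0 ≤ j := fun j hj => pvKF_nonneg q j (by rw [hK]; simp [hj])
          simp only [List.map_cons, pvSegs]
          have hm1 : (-1 : Int) + 1 = 0 := by norm_num
          rw [hm1]
          have hcons : PySem.List.pyRange 0 (k + 1) 1
              = 0 :: (PySem.List.pyRange 0 k 1).map (· + 1) := by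
            rw [PySem.List.pyRange_one_cons (by omega)]
            congr 1
            have h2 := pvRange_shift 0 k
            norm_num at h2
            exact h2
          rw [hcons, pvSegs_shift ks k]
          have hc0 : pvCount (x :: s) (0 :: (PySem.List.pyRange 0 k 1).map (· + 1))
              = (if x = '-' then 0 else 1) + pvCount s (PySem.List.pyRange 0 k 1) := by
            rw [pvCount_cons, PySem.List.pyGetD_zero_cons,
              pvCount_shift x s _ (fun i hi => by rw [PySem.List.mem_pyRange_one] at hi; omega)]
          have hrest : List.map (pvCount (x :: s)) (List.map (List.map (· + 1)) (pvSegs ks k))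
              = List.map (pvCount s) (pvSegs ks k) := by
            rw [List.map_map]
            apply List.map_congr_left
            intro seg hseg
            exact pvCount_shift x s seg (pvSegs_nonneg ks k (by omega) hks seg hseg)
          rw [hrest, hc0]
          simp only [pvAddFirst]
          have hd : (if x ≠ '-' then (1 : Int) else 0) = (if x = '-' then 0 else 1) := by
            by_cases hx : x = '-' <;> simp [hx]
          rw [hd]
          congr 1
          ring
      · -- keep column in the query
        have hKq : pvKF (ch :: q) = 0 :: (pvKF q).map (· + 1) := by simp [pvKF, h]
        have hb' : ∀ i ∈ pvKF q, i < (s.length : Int) := by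
          intro i hi
          have := hb (i + 1) (by rw [hKq]; exact List.mem_cons_of_mem _ (List.mem_map_of_mem hi))
          simp at this ⊢
          omega
        have hda : pvDA ((x :: s).zip (ch :: q)) c = c :: pvDA (s.zip q) 0 := by
          simp [List.zip_cons_cons, pvDA, h]
        rw [hda, ih s 0 hb', pvAddFirst_zero, hKq]
        simp only [pvSegs]
        have hm1 : (-1 : Int) + 1 = 0 := by norm_num
        rw [hm1]
        rw [PySem.List.pyRange_one_eq_nil (by norm_num : (0 : Int) ≤ 0)]
        have hshift : pvSegs ((pvKF q).map (· + 1)) 0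
            = (pvSegs (pvKF q) (-1)).map (List.map (· + 1)) := by
          have h2 := pvSegs_shift (pvKF q) (-1)
          rw [hm1] at h2
          exact h2
        rw [hshift]
        have hrest : List.map (pvCount (x :: s)) (List.map (List.map (· + 1)) (pvSegs (pvKF q) (-1)))
            = List.map (pvCount s) (pvSegs (pvKF q) (-1)) := by
          rw [List.map_map]
          apply List.map_congr_left
          intro seg hseg
          exact pvCount_shift x s seg
            (pvSegs_nonneg (pvKF q) (-1) (by omega) (pvKF_nonneg q) seg hseg)
        rw [List.map_cons, hrest]
        have hnil : pvCount (x :: s) [] = 0 := rfl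
        rw [hnil]
        simp [pvAddFirst]

-- ===== accumulation characterization =====

theorem pvFoldlFilterMap {α β γ : Type} (f : α → Option β) (g : γ → β → γ) (l : List α) (i : γ) :
    (l.filterMap f).foldl g i = l.foldl (fun a x => match f x with | some b => g a b | none => a) i := by
  induction l generalizing i with
  | nil => rfl
  | cons x xs ih =>
    simp only [List.filterMap_cons, List.foldl_cons]
    cases h : f x <;> simp [ih]

def pvMStep (d : PySem.Dict (List Char) (List Char)) (p : List Char × List Char) :
    PySem.Dict (List Char) (List Char) :=
  d.insert p.1 (d.getD p.1 [] ++ p.2)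

theorem pvAccum_pairs (s : String) :
    pvAccum s = (pvPairs s).foldl pvMStep PySem.Dict.empty := by
  rw [pvPairs, pvFoldlFilterMap, pvAccum]
  apply PySem.List.foldl_congr_mem
  intro d line0 _
  rw [pvParseLine?]
  by_cases hc : ((PySem.Chars.strip line0).isEmpty
      || PySem.Chars.startswith (PySem.Chars.strip line0) ['#']
      || PySem.Chars.startswith (PySem.Chars.strip line0) ['/', '/']) = true
  · simp only [hc, if_true]
  · simp only [hc]
    cases hsp : PySem.Chars.split₀ (PySem.Chars.strip line0) with
    | nil => rfl
    | cons t1 rest =>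
      cases rest with
      | nil => rfl
      | cons t2 rest2 =>
        cases rest2 with
        | nil =>
          simp only [pvMStep]
          by_cases hm : d.contains t1 = true
          · simp [hm]
          · have hg : d.getD t1 [] = [] := by
              rw [PySem.Dict.getD_of_not_contains]
              exact Bool.eq_false_iff.mpr hm
            simp [hm, hg,
              PySem.Dict.getD_insert_self, PySem.Dict.insert_insert_self]
        | cons _ _ => rfl

theorem pvAccum_keys (s : String) : (pvAccum s).keys = pvNames s := by
  rw [pvAccum_pairs, pvNames]
  have h2 : (pvPairs s).foldl pvMStep PySem.Dict.empty
      = (pvPairs s).foldl (fun d x => d.insert x.1 (d.getD x.1 [] ++ x.2)) PySem.Dict.empty := rfl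
  rw [h2, PySem.Dict.keys_foldl_insert_key, PySem.Dict.keys_empty, PySem.Set.update_nil_left]

theorem pvAccum_nodup (s : String) : (pvAccum s).keys.Nodup := by
  rw [pvAccum_pairs]
  exact PySem.Dict.nodup_keys_foldl_insert_key (pvPairs s) (fun p => p.1)
    (fun d p => d.getD p.1 [] ++ p.2) PySem.Dict.empty PySem.Dict.nodup_keys_empty

theorem pvGetD_fold (ps : List (List Char × List Char)) :
    ∀ (d : PySem.Dict (List Char) (List Char)) (n : List Char),
    (ps.foldl pvMStep d).getD n []
      = d.getD n [] ++ ((ps.filter (fun p => p.1 == n)).map (·.2)).flatten := by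
  induction ps with
  | nil => intro d n; simp
  | cons p ps ih =>
    intro d n
    simp only [List.foldl_cons, List.filter_cons]
    rw [ih]
    by_cases h : p.1 = n
    · subst h
      rw [pvMStep, PySem.Dict.getD_insert_self]
      simp
    · rw [pvMStep, PySem.Dict.getD_insert, if_neg (fun hh => h hh.symm)]
      simp [h]

theorem pvAccum_values (s : String) : (pvAccum s).values = pvSeqList s := by
  rw [PySem.Dict.values_eq_map_keys (pvAccum s) (pvAccum_nodup s) []]
  rw [pvAccum_keys, pvSeqList]
  apply List.map_congr_left
  intro n _
  rw [pvAccum_pairs, pvGetD_fold, pvSeqFor]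
  simp

-- ===== A's main loop =====

theorem pvALoop (vs : List (List Char)) : ∀ (s : Int), 1 ≤ s →
    ∀ (msa : List String) (dm : List (List Int)) (q : List Char) (keep : List Int),
    (PySem.List.enumerate vs s).foldl
      (fun (st : List String × List (List Int) × List Char × List Int) p =>
        let qk := if p.1 = 0 then (p.2, pvKeepCols p.2) else (st.2.2.1, st.2.2.2)
        let aligned := String.ofList (qk.2.map (fun c => PySem.List.pyGetD p.2 c ' '))
        let dv := ((p.2.zip qk.1).foldl
          (fun (vc : List Int × Int) pr =>
            if pr.1 ≠ '-' ∨ pr.2 ≠ '-' then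
              (if pr.2 = '-' then (vc.1, vc.2 + 1) else (vc.1 ++ [vc.2], 0))
            else vc) ([], 0)).1
        (st.1 ++ [aligned], st.2.1 ++ [dv], qk.1, qk.2))
      (msa, dm, q, keep)
    = (msa ++ vs.map (fun v => String.ofList (keep.map (fun c => PySem.List.pyGetD v c ' '))),
       dm ++ vs.map (fun v => ((v.zip q).foldl
          (fun (vc : List Int × Int) pr =>
            if pr.1 ≠ '-' ∨ pr.2 ≠ '-' then
              (if pr.2 = '-' then (vc.1, vc.2 + 1) else (vc.1 ++ [vc.2], 0))
            else vc) ([], 0)).1),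
       q, keep) := by
  induction vs with
  | nil => intro s hs msa dm q keep; simp [PySem.List.enumerate_nil]
  | cons v vs ih =>
    intro s hs msa dm q keep
    rw [PySem.List.enumerate_cons, List.foldl_cons]
    have hne : ¬ (s = 0) := by omega
    simp only [hne, if_false]
    rw [ih (s + 1) (by omega)]
    simp

theorem pvAFold (v0 : List Char) (vs : List (List Char)) :
    (PySem.List.enumerate (v0 :: vs) 0).foldl
      (fun (st : List String × List (List Int) × List Char × List Int) p =>
        let qk := if p.1 = 0 then (p.2, pvKeepCols p.2) else (st.2.2.1, st.2.2.2)
        let aligned := String.ofList (qk.2.map (fun c => PySem.List.pyGetD p.2 c ' '))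
        let dv := ((p.2.zip qk.1).foldl
          (fun (vc : List Int × Int) pr =>
            if pr.1 ≠ '-' ∨ pr.2 ≠ '-' then
              (if pr.2 = '-' then (vc.1, vc.2 + 1) else (vc.1 ++ [vc.2], 0))
            else vc) ([], 0)).1
        (st.1 ++ [aligned], st.2.1 ++ [dv], qk.1, qk.2))
      ([], [], [], [])
    = ((v0 :: vs).map (fun v => String.ofList ((pvKeepCols v0).map (fun c => PySem.List.pyGetD v c ' '))),
       (v0 :: vs).map (fun v => ((v.zip v0).foldl
          (fun (vc : List Int × Int) pr =>
            if pr.1 ≠ '-' ∨ pr.2 ≠ '-' then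
              (if pr.2 = '-' then (vc.1, vc.2 + 1) else (vc.1 ++ [vc.2], 0))
            else vc) ([], 0)).1),
       v0, pvKeepCols v0) := by
  rw [PySem.List.enumerate_cons, List.foldl_cons]
  exact pvALoop vs (0 + 1) (by norm_num) _ _ _ _

-- ===== VERDICT (by name: the statement is the Claim_ definition above) =====
theorem parse_stockholm_spec : Claim_equal_parse_stockholm := by
  intro s _ hpre
  unfold Spec_parse_stockholm
  obtain ⟨-, hp2⟩ := hpre
  cases hsl : pvSeqList s with
  | nil =>
    have hveq : (pvAccum s).values = [] := by rw [pvAccum_values, hsl]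
    have hnames : pvNames s = [] := List.map_eq_nil_iff.mp (by rw [← pvSeqList]; exact hsl)
    have hkeys : (pvAccum s).keys = [] := by rw [pvAccum_keys, hnames]
    simp [parse_stockholm, parse_stockholm_alt, hveq, hkeys, PySem.List.enumerate_nil]
  | cons v0 vs =>
    have hveq : (pvAccum s).values = v0 :: vs := by rw [pvAccum_values, hsl]
    have hq : pvQuery s = v0 := by rw [pvQuery, hsl]; rfl
    have hbound : ∀ v ∈ v0 :: vs, ∀ i ∈ pvKF v0, i < (v.length : Int) := by
      intro v hv i hi
      exact hp2 v (by rw [hsl]; exact hv) i (by rw [hq, pvKeep_eq]; exact hi)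
    simp only [parse_stockholm, parse_stockholm_alt, hveq]
    rw [pvAFold v0 vs]
    rw [pvSegs_foldl (pvKeepCols v0) [] (-1), List.nil_append]
    simp only [Prod.mk.injEq]
    refine ⟨trivial, ?_, trivial⟩
    apply List.map_congr_left
    intro v hv
    have h1 := pvDA_foldl (v.zip v0) [] 0
    rw [List.nil_append] at h1
    rw [h1, pvMain v0 v 0 (hbound v hv), pvAddFirst_zero, pvKeep_eq]
    rfl
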